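-- pv_equiv track=rewrite | github.com/google-research/flood-forecasting | googlehydrology/datasetzoo/multimet.py | _get_products_and_bands_from_feature_strings
-- ===== SOURCE A (Python) =====
-- from typing import Hashable, Iterable
--
-- def _get_products_and_bands_from_feature_strings(
--     features: Iterable[str],
-- ) -> dict[str, list[str]]:
--     """
--     Processes feature strings to create a dictionary of product to band(s).
--
--     Parameters
--     ----------
--     features : list[str]
--         A list features in the format `<product>_<band>. This is the format for feature
--         names in the Multimet dataset.
--
--     Returns
--     -------
--     dict[str, list[str]]
--         Keys are product names and values are a list of features for that product. Features
--         remain in the format <product>_<band>.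
--     """
--     product_bands = {}
--     for feature in features:
--         product = feature.split('_')[0].upper()
--         if product == 'ERA5LAND':
--             product = 'ERA5_LAND'
--         product_bands.setdefault(product, []).append(feature)
--     return product_bands
-- ===== SOURCE B (Python) =====
-- def _get_products_and_bands_from_feature_strings(features):
--     feats = list(features)
--
--     def _product(feature):
--         p = feature.split('_')[0].upper()
--         return 'ERA5_LAND' if p == 'ERA5LAND' else p
--
--     products = list(dict.fromkeys(_product(f) for f in feats))
--     return {p: [f for f in feats if _product(f) == p] for p in products}
-- ===== Notes on version B (the rewrite author's own statement) =====
-- stated objective: alternative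
-- what changed: Replaces the incremental setdefault-append accumulation with a two-phase pass: first compute the first-occurrence-ordered list of product keys (dict.fromkeys), then build each product's band list by filtering the input once per product.
import Mathlib
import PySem

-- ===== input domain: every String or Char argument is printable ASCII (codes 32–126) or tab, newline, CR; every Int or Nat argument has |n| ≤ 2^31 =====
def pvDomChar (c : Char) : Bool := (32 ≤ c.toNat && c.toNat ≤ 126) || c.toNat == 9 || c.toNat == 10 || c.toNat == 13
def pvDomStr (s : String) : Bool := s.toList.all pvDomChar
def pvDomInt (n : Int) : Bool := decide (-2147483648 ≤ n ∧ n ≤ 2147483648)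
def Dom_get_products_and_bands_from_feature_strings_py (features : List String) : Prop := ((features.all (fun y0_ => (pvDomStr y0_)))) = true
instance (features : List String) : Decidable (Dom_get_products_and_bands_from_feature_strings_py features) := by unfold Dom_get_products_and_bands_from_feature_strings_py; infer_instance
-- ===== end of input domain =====

-- B replaces the incremental setdefault-append accumulation with a two-phase pass
-- (first-occurrence-ordered key list, then one filter per product); return values proved equal.

-- ===== PORT A =====
-- product = feature.split('_')[0].upper(); if product == 'ERA5LAND': product = 'ERA5_LAND'
def pvProduct (feature : String) : String :=
  let p := PySem.Str.upper (((PySem.Str.split? feature "_").getD []).headD "")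
  if p == "ERA5LAND" then "ERA5_LAND" else p

-- product_bands.setdefault(product, []).append(feature)  ≡  d[product] = d.get(product, []) + [feature]
def get_products_and_bands_from_feature_strings_py (features : List String) : List (String × List String) :=
  (features.foldl
    (fun d feature => d.modify (pvProduct feature) [] (fun bs => bs ++ [feature]))
    PySem.Dict.empty).items

-- ===== PORT B =====
def get_products_and_bands_from_feature_strings_py_alt (features : List String) : List (String × List String) :=
  let products := PySem.List.dedup (features.map pvProduct)
  products.map (fun p => (p, features.filter (fun f => pvProduct f == p)))

-- ===== PRECONDITION & SPEC =====
def Spec_get_products_and_bands_from_feature_strings_py (features : List String) (out : List (String × List String)) : Prop := out = get_products_and_bands_from_feature_strings_py_alt features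
instance (features : List String) (out : List (String × List String)) : Decidable (Spec_get_products_and_bands_from_feature_strings_py features out) := by unfold Spec_get_products_and_bands_from_feature_strings_py; infer_instance

-- ===== CLAIM (what is proved, stated in full; the proofs are below) =====
def Claim_equal_get_products_and_bands_from_feature_strings_py : Prop := ∀ (features : List String), Dom_get_products_and_bands_from_feature_strings_py features → Spec_get_products_and_bands_from_feature_strings_py features (get_products_and_bands_from_feature_strings_py features)

-- ===== LEMMAS AND PROOFS =====

-- A's loop over features, seen as the generic grouping fold over (key, value) pairs.
theorem pvFold_eq_pairs (features : List String) :
    features.foldl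
      (fun d feature => d.modify (pvProduct feature) [] (fun bs => bs ++ [feature]))
      (PySem.Dict.empty : PySem.Dict String (List String))
    = (features.map (fun f => (pvProduct f, f))).foldl
        (fun d p => d.modify p.1 [] (fun bs => bs ++ [p.2])) PySem.Dict.empty := by
  rw [List.foldl_map]

theorem pvKeys_nodup (features : List String) :
    (features.foldl
      (fun d feature => d.modify (pvProduct feature) [] (fun bs => bs ++ [feature]))
      (PySem.Dict.empty : PySem.Dict String (List String))).keys.Nodup := by
  exact PySem.Dict.nodup_keys_foldl_modify_key features pvProduct []
    (fun d f => fun bs => bs ++ [f]) PySem.Dict.empty (by simp [PySem.Dict.keys_empty])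

theorem pvMain (features : List String) :
    (features.foldl
      (fun d feature => d.modify (pvProduct feature) [] (fun bs => bs ++ [feature]))
      (PySem.Dict.empty : PySem.Dict String (List String))).items
    = (PySem.List.dedup (features.map pvProduct)).map
        (fun p => (p, features.filter (fun f => pvProduct f == p))) := by
  rw [PySem.Dict.items_eq_map_keys _ (pvKeys_nodup features) ([] : List String),
      PySem.Dict.keys_foldl_modify_key, PySem.Dict.keys_empty, PySem.Set.update_nil_left,
      PySem.List.dedup_eq_ofList]
  refine List.map_congr_left (fun p hp => ?_)
  congr 1
  rw [pvFold_eq_pairs, PySem.Dict.getD_foldl_modify_append, PySem.Dict.getD_empty]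
  simp [List.filter_map, List.map_map, Function.comp_def]

-- ===== VERDICT (by name: the statement is the Claim_ definition above) =====
theorem get_products_and_bands_from_feature_strings_py_spec : Claim_equal_get_products_and_bands_from_feature_strings_py := by
  intro features _
  exact pvMain features
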